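-- pv_equiv track=rewrite | github.com/subrotonpi/clone_evaluation | data/gptcb_cross/gptcb_cross/None/1863.py | solution
-- ===== SOURCE A (Python) =====
-- def solution(S, P, Q):
--     result = [0] * len(P)
--     factor1 = [0] * len(S)
--     factor2 = [0] * len(S)
--     factor3 = [0] * len(S)
--     factor4 = [0] * len(S)
--     factor1_sum = 0
--     factor2_sum = 0
--     factor3_sum = 0
--     factor4_sum = 0
--
--     for i in range(len(S)):
--         if S[i] == 'A':
--             factor1_sum += 1
--         elif S[i] == 'C':
--             factor2_sum += 1
--         elif S[i] == 'G':
--             factor3_sum += 1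
--         elif S[i] == 'T':
--             factor4_sum += 1
--         factor1[i] = factor1_sum
--         factor2[i] = factor2_sum
--         factor3[i] = factor3_sum
--         factor4[i] = factor4_sum
--
--     for i in range(len(P)):
--         start = P[i]
--         end = Q[i]
--         if start == 0:
--             if factor1[end] > 0:
--                 result[i] = 1
--             elif factor2[end] > 0:
--                 result[i] = 2
--             elif factor3[end] > 0:
--                 result[i] = 3
--             else:
--                 result[i] = 4
--         else:
--             if factor1[end] > factor1[start - 1]:
--                 result[i] = 1
--             elif factor2[end] > factor2[start - 1]:
--                 result[i] = 2
--             elif factor3[end] > factor3[start - 1]: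
--                 result[i] = 3
--             else:
--                 result[i] = 4
--
--     return result
-- ===== SOURCE B (Python) =====
-- def solution(S, P, Q):
--     result = []
--     for start, end in zip(P, Q):
--         sub = S[start:end + 1]
--         if 'A' in sub:
--             result.append(1)
--         elif 'C' in sub:
--             result.append(2)
--         elif 'G' in sub:
--             result.append(3)
--         else:
--             result.append(4)
--     return result
-- ===== Notes on version B (the rewrite author's own statement) =====
-- stated objective: simpler
-- what changed: Drops all four prefix-sum tables and the index-based second pass; B zips P with Q and directly scans each inclusive substring S[P[i]:Q[i]+1] for 'A', 'C', 'G' in priority order, defaulting to 4.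
-- outside the precondition, e.g. on solution('AC', [1], [-1]): A returns [2], B returns [4]
import Mathlib
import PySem

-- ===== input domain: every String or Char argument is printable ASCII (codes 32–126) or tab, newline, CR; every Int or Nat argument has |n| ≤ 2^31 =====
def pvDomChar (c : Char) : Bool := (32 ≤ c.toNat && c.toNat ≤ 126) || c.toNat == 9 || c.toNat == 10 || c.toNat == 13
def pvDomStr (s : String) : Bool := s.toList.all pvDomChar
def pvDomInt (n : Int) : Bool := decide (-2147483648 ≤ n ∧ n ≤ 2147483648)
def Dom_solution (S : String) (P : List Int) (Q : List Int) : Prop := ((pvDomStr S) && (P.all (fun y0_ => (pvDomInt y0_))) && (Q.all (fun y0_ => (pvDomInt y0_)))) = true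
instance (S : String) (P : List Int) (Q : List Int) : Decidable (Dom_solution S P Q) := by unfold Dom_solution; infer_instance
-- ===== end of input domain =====

-- B drops the four prefix-sum tables and instead scans each inclusive substring directly (simpler).

-- ===== PORT A =====
-- the first loop of A: builds the four running prefix-count arrays in one pass
def pvFactors : List Char → Int → Int → Int → Int → List Int × List Int × List Int × List Int
  | [], _, _, _, _ => ([], [], [], [])
  | c :: rest, s1, s2, s3, s4 =>
    -- the elif chain: a char equals at most one of the four literals, so the branches are independent
    let n1 := if c = 'A' then s1 + 1 else s1
    let n2 := if c = 'C' then s2 + 1 else s2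
    let n3 := if c = 'G' then s3 + 1 else s3
    let n4 := if c = 'T' then s4 + 1 else s4
    let r := pvFactors rest n1 n2 n3 n4
    (n1 :: r.1, n2 :: r.2.1, n3 :: r.2.2.1, n4 :: r.2.2.2)

def solution (S : String) (P : List Int) (Q : List Int) : List Int :=
  let f := pvFactors S.toList 0 0 0 0
  -- pyGetD is exact here: Pre_solution keeps every index in range, where Python's xs[i] returns
  (List.range P.length).map (fun (i : Nat) =>
    let start := PySem.List.pyGetD P ((i : Nat) : Int) 0
    let stop := PySem.List.pyGetD Q ((i : Nat) : Int) 0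
    if start = 0 then
      if 0 < PySem.List.pyGetD f.1 stop 0 then 1
      else if 0 < PySem.List.pyGetD f.2.1 stop 0 then 2
      else if 0 < PySem.List.pyGetD f.2.2.1 stop 0 then 3
      else 4
    else
      if PySem.List.pyGetD f.1 (start - 1) 0 < PySem.List.pyGetD f.1 stop 0 then 1
      else if PySem.List.pyGetD f.2.1 (start - 1) 0 < PySem.List.pyGetD f.2.1 stop 0 then 2
      else if PySem.List.pyGetD f.2.2.1 (start - 1) 0 < PySem.List.pyGetD f.2.2.1 stop 0 then 3
      else 4)

-- ===== PORT B =====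
def solution_alt (S : String) (P : List Int) (Q : List Int) : List Int :=
  (P.zip Q).map (fun se =>
    let sub := PySem.List.slice S.toList (some se.1) (some (se.2 + 1))
    if sub.contains 'A' then 1
    else if sub.contains 'C' then 2
    else if sub.contains 'G' then 3
    else 4)

-- ===== PRECONDITION & SPEC =====
-- Pre_ excludes inputs where A raises IndexError (a query index ≥ len(S), or more P entries than Q
-- entries) and inputs with negative in-range indices, where A's answer comes from Python's
-- negative-index wraparound into the prefix arrays — an accident of the table representation;
-- B slices there instead.  The natural domain of the problem is 0 ≤ P[i], Q[i] < len(S).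
def Pre_solution (S : String) (P : List Int) (Q : List Int) : Prop :=
  P.length ≤ Q.length ∧ (∀ x ∈ P, 0 ≤ x ∧ x < (S.length : Int)) ∧
    (∀ x ∈ Q.take P.length, 0 ≤ x ∧ x < (S.length : Int))
instance (S : String) (P : List Int) (Q : List Int) : Decidable (Pre_solution S P Q) := by
  unfold Pre_solution; infer_instance

def pvWitness_solution : String × List Int × List Int := ("ACGT", [0, 2], [3, 1])

def Spec_solution (S : String) (P : List Int) (Q : List Int) (out : List Int) : Prop := out = solution_alt S P Q
instance (S : String) (P : List Int) (Q : List Int) (out : List Int) : Decidable (Spec_solution S P Q out) := by unfold Spec_solution; infer_instance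

-- ===== CLAIM (what is proved, stated in full; the proofs are below) =====
def Claim_equal_solution : Prop := ∀ (S : String) (P : List Int) (Q : List Int), Dom_solution S P Q → Pre_solution S P Q → Spec_solution S P Q (solution S P Q)

-- ===== LEMMAS AND PROOFS =====

-- one prefix-count column of pvFactors, for the proof only
def pvPrefix (ch : Char) : List Char → Int → List Int
  | [], _ => []
  | c :: rest, s => let n := if c = ch then s + 1 else s; n :: pvPrefix ch rest n

theorem pvFactors_eq (l : List Char) : ∀ a b c d : Int,
    pvFactors l a b c d = (pvPrefix 'A' l a, pvPrefix 'C' l b, pvPrefix 'G' l c, pvPrefix 'T' l d) := by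
  induction l with
  | nil => intro a b c d; rfl
  | cons x rest ih =>
    intro a b c d
    simp only [pvFactors, pvPrefix, ih]

theorem pvPrefix_length (ch : Char) (l : List Char) : ∀ s : Int, (pvPrefix ch l s).length = l.length := by
  induction l with
  | nil => intro s; rfl
  | cons x rest ih => intro s; simp [pvPrefix, ih]

theorem pvPrefix_getD (ch : Char) (l : List Char) : ∀ (i : Nat) (s : Int), i < l.length →
    (pvPrefix ch l s).getD i 0 = s + ((l.take (i + 1)).count ch) := by
  induction l with
  | nil => intro i s h; simp at h
  | cons x rest ih =>
    intro i s h
    cases i with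
    | zero =>
      simp [pvPrefix, List.count_cons]
      by_cases hx : x = ch <;> simp [hx]
    | succ j =>
      have hj : j < rest.length := by simpa using h
      simp only [pvPrefix, List.getD_cons_succ, List.take_succ_cons, List.count_cons]
      rw [ih j _ hj]
      by_cases hx : x = ch <;> simp [hx] <;> ring

theorem count_take_lt_iff (ch : Char) (l : List Char) (s e1 : Nat) :
    ((l.take s).count ch < (l.take e1).count ch) ↔ ch ∈ (l.drop s).take (e1 - s) := by
  by_cases hle : s ≤ e1
  · have : l.take e1 = l.take s ++ (l.drop s).take (e1 - s) := by
      rw [← List.take_add]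
      congr 1
      omega
    rw [this, List.count_append, ← List.count_pos_iff]
    omega
  · have h0 : e1 - s = 0 := by omega
    have hsub : (l.take e1).Sublist (l.take s) :=
      List.take_sublist_take_left (by omega : e1 ≤ s)
    have := hsub.count_le ch
    simp [h0]
    omega

-- A's per-query decision, via the prefix counts, equals B's substring scan, for 0 ≤ p, q < len
theorem query_eq (l : List Char) (p q : Int) (hp0 : 0 ≤ p) (hp : p < (l.length : Int))
    (hq0 : 0 ≤ q) (hq : q < (l.length : Int)) :
    (if p = 0 then
      if 0 < (pvPrefix 'A' l 0).getD q.toNat 0 then (1:Int)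
      else if 0 < (pvPrefix 'C' l 0).getD q.toNat 0 then 2
      else if 0 < (pvPrefix 'G' l 0).getD q.toNat 0 then 3
      else 4
    else
      if (pvPrefix 'A' l 0).getD (p-1).toNat 0 < (pvPrefix 'A' l 0).getD q.toNat 0 then 1
      else if (pvPrefix 'C' l 0).getD (p-1).toNat 0 < (pvPrefix 'C' l 0).getD q.toNat 0 then 2
      else if (pvPrefix 'G' l 0).getD (p-1).toNat 0 < (pvPrefix 'G' l 0).getD q.toNat 0 then 3
      else 4) =
    (let sub := (l.drop p.toNat).take ((q+1).toNat - p.toNat)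
     if sub.contains 'A' then (1:Int)
     else if sub.contains 'C' then 2
     else if sub.contains 'G' then 3
     else 4) := by
  have hqn : q.toNat < l.length := by omega
  have hq1 : (q + 1).toNat = q.toNat + 1 := by omega
  have hgq : ∀ ch, (pvPrefix ch l 0).getD q.toNat 0 = ((l.take (q.toNat + 1)).count ch : Int) := by
    intro ch; rw [pvPrefix_getD ch l q.toNat 0 hqn]; ring
  simp only [List.contains_eq_mem, decide_eq_true_eq]
  by_cases hp0' : p = 0
  · subst hp0'
    have key : ∀ ch : Char, (0 < (pvPrefix ch l 0).getD q.toNat 0) ↔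
        ch ∈ (l.drop (0:Int).toNat).take ((q + 1).toNat - (0:Int).toNat) := by
      intro ch
      rw [hgq, hq1, ← count_take_lt_iff ch l (0:Int).toNat (q.toNat + 1)]
      simp
    rw [if_pos rfl]
    have kA := key 'A'; have kC := key 'C'; have kG := key 'G'
    split_ifs <;> tauto
  · have hp1 : (p - 1).toNat < l.length := by omega
    have hs : (p - 1).toNat + 1 = p.toNat := by omega
    have hgp : ∀ ch, (pvPrefix ch l 0).getD (p - 1).toNat 0 = ((l.take p.toNat).count ch : Int) := by
      intro ch; rw [pvPrefix_getD ch l (p - 1).toNat 0 hp1, hs]; ring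
    have key : ∀ ch : Char, ((pvPrefix ch l 0).getD (p - 1).toNat 0 < (pvPrefix ch l 0).getD q.toNat 0) ↔
        ch ∈ (l.drop p.toNat).take ((q + 1).toNat - p.toNat) := by
      intro ch
      rw [hgq, hgp, hq1, ← count_take_lt_iff ch l p.toNat (q.toNat + 1)]
      omega
    rw [if_neg hp0']
    have kA := key 'A'; have kC := key 'C'; have kG := key 'G'
    split_ifs <;> tauto

-- ===== VERDICT (by name: the statement is the Claim_ definition above) =====
theorem solution_spec : Claim_equal_solution := by
  intro S P Q _hDom hPre
  obtain ⟨hlen, hP, hQ⟩ := hPre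
  unfold Spec_solution solution solution_alt
  rw [pvFactors_eq]
  apply List.ext_getElem
  · simp [List.length_zip]; omega
  · intro i hi1 hi2
    have hiP : i < P.length := by simpa using hi1
    have hiQ : i < Q.length := by omega
    simp only [List.getElem_map, List.getElem_range, List.getElem_zip]
    have hPi := hP P[i] (List.getElem_mem hiP)
    have hQi : 0 ≤ Q[i] ∧ Q[i] < (S.length : Int) := by
      apply hQ
      have : Q[i] = (Q.take P.length)[i]'(by simp; omega) := by
        simp [List.getElem_take]
      rw [this]
      exact List.getElem_mem _
    have hgP : PySem.List.pyGetD P (i : Int) 0 = P[i] := by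
      rw [PySem.List.pyGetD_natCast, List.getD_eq_getElem _ _ hiP]
    have hgQ : PySem.List.pyGetD Q (i : Int) 0 = Q[i] := by
      rw [PySem.List.pyGetD_natCast, List.getD_eq_getElem _ _ hiQ]
    simp only [hgP, hgQ]
    -- rewrite the pyGetD accesses into the prefix arrays as plain getD at Nat indices
    have hlenS : (String.length S) = S.toList.length :=
      (by simp : S.toList.length = S.length).symm
    rw [hlenS] at hPi hQi
    have hlen1 : ∀ ch, (pvPrefix ch S.toList 0).length = S.toList.length :=
      fun ch => pvPrefix_length ch S.toList 0
    have hget : ∀ (ch : Char) (j : Int), 0 ≤ j → j < (S.toList.length : Int) →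
        PySem.List.pyGetD (pvPrefix ch S.toList 0) j 0 = (pvPrefix ch S.toList 0).getD j.toNat 0 := by
      intro ch j hj0 hjlt
      have hjl : j.toNat < (pvPrefix ch S.toList 0).length := by rw [hlen1]; omega
      rw [PySem.List.pyGetD_eq_getElem _ 0 hj0 (by rw [hlen1]; omega), List.getD_eq_getElem _ _ hjl]
    -- slice with in-range bounds
    have hslice : PySem.List.slice S.toList (some P[i]) (some (Q[i] + 1)) =
        (S.toList.drop (P[i]).toNat).take ((Q[i] + 1).toNat - (P[i]).toNat) := by
      apply PySem.List.slice_of_nonneg <;> omega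
    rw [hslice]
    by_cases hp0 : P[i] = 0
    · have h := query_eq S.toList P[i] Q[i] hPi.1 hPi.2 hQi.1 hQi.2
      rw [if_pos hp0] at h
      rw [if_pos hp0]
      rw [hget 'A' Q[i] hQi.1 hQi.2, hget 'C' Q[i] hQi.1 hQi.2, hget 'G' Q[i] hQi.1 hQi.2]
      exact h
    · have h := query_eq S.toList P[i] Q[i] hPi.1 hPi.2 hQi.1 hQi.2
      rw [if_neg hp0] at h
      rw [if_neg hp0]
      have hpm0 : (0:Int) ≤ P[i] - 1 := by omega
      have hpmlt : P[i] - 1 < (S.toList.length : Int) := by omega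
      rw [hget 'A' Q[i] hQi.1 hQi.2, hget 'C' Q[i] hQi.1 hQi.2, hget 'G' Q[i] hQi.1 hQi.2,
        hget 'A' _ hpm0 hpmlt, hget 'C' _ hpm0 hpmlt, hget 'G' _ hpm0 hpmlt]
      exact h
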